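-- pv_equiv track=rewrite | github.com/Himpq/Nexora | ChatDBServer/api/model.py | _model_rule_match
-- ===== SOURCE A (Python) =====
-- def _model_rule_match(model_token: str, rule_token: str) -> bool:
--     if not model_token or not rule_token:
--         return False
--     if model_token == rule_token:
--         return True
--     # 兼容快照/思考等后缀：qwen3.5-plus-thinking / qwen-plus-2026-xx
--     for sep in ("-", "_", "."):
--         if model_token.startswith(rule_token + sep):
--             return True
--     return False
-- ===== SOURCE B (Python) =====
-- def _model_rule_match(model_token: str, rule_token: str) -> bool:
--     if not model_token or not rule_token:
--         return False
--     i = 0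
--     for ch in rule_token:
--         if i >= len(model_token) or model_token[i] != ch:
--             return False
--         i += 1
--     return i == len(model_token) or model_token[i] in "-_."
-- ===== Notes on version B (the rewrite author's own statement) =====
-- stated objective: alternative
-- what changed: Replaces the equality pre-check plus loop over three constructed prefixes (rule_token + sep, each scanned by startswith) with a single character-by-character walk of both strings that, when the rule is exhausted, accepts iff the model is exhausted too or its next character is a separator.
import Mathlib
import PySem

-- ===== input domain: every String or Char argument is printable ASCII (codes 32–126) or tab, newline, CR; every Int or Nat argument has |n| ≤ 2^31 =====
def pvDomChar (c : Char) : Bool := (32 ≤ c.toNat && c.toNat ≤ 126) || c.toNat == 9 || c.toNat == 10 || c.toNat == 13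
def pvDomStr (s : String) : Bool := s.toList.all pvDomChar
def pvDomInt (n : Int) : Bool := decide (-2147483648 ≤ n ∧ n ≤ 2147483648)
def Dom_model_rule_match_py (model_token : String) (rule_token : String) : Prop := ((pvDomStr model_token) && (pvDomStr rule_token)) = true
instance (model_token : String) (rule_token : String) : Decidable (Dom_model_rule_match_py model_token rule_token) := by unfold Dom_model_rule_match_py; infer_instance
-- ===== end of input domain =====

-- B replaces A's equality pre-check + loop over three constructed prefixes with one
-- character-by-character walk of both strings (alternative decomposition, same results).

-- ===== PORT A =====
def model_rule_match_py (model_token : String) (rule_token : String) : Bool :=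
  if model_token == "" || rule_token == "" then false
  else if model_token == rule_token then true
  else
    -- for sep in ("-", "_", "."): if model_token.startswith(rule_token + sep): return True
    ["-", "_", "."].any (fun sep => PySem.Str.startswith model_token (rule_token ++ sep))

-- ===== PORT B =====
-- Source B's loop "for ch in rule_token" with index i into model_token: the recursion walks
-- the rule list and the remaining suffix model_token[i:] of the model list together.
def pvBWalk : List Char → List Char → Bool
  | [], [] => true                                   -- i == len(model_token)
  | [], c :: _ => c == '-' || c == '_' || c == '.'   -- model_token[i] in "-_."
  | _ :: _, [] => false                              -- i >= len(model_token)
  | ch :: rt, b :: mt => b == ch && pvBWalk rt mt    -- model_token[i] != ch → False; else i += 1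

def model_rule_match_py_alt (model_token : String) (rule_token : String) : Bool :=
  if model_token == "" || rule_token == "" then false
  else pvBWalk rule_token.toList model_token.toList

-- ===== PRECONDITION & SPEC =====
def Spec_model_rule_match_py (model_token : String) (rule_token : String) (out : Bool) : Prop := out = model_rule_match_py_alt model_token rule_token
instance (model_token : String) (rule_token : String) (out : Bool) : Decidable (Spec_model_rule_match_py model_token rule_token out) := by unfold Spec_model_rule_match_py; infer_instance

-- ===== CLAIM (what is proved, stated in full; the proofs are below) =====
def Claim_equal_model_rule_match_py : Prop := ∀ (model_token : String) (rule_token : String), Dom_model_rule_match_py model_token rule_token → Spec_model_rule_match_py model_token rule_token (model_rule_match_py model_token rule_token)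

-- ===== LEMMAS AND PROOFS =====

lemma pvBWalk_iff (rl ml : List Char) :
    pvBWalk rl ml = true ↔ ml = rl ∨ ∃ c, c ∈ ['-', '_', '.'] ∧ rl ++ [c] <+: ml := by
  induction rl generalizing ml with
  | nil =>
    cases ml with
    | nil => simp [pvBWalk]
    | cons c t =>
      simp only [pvBWalk, Bool.or_eq_true, beq_iff_eq, List.nil_append, List.mem_cons,
        List.not_mem_nil, or_false]
      constructor
      · rintro ((h | h) | h)
        · exact Or.inr ⟨c, Or.inl h, ⟨t, rfl⟩⟩
        · exact Or.inr ⟨c, Or.inr (Or.inl h), ⟨t, rfl⟩⟩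
        · exact Or.inr ⟨c, Or.inr (Or.inr h), ⟨t, rfl⟩⟩
      · rintro (h | ⟨d, hd, hp⟩)
        · simp at h
        · rw [List.cons_prefix_iff] at hp; rcases hd with h | h | h <;> simp_all
  | cons a rt ih =>
    cases ml with
    | nil => simp [pvBWalk]
    | cons b mt =>
      simp only [pvBWalk, Bool.and_eq_true, beq_iff_eq, ih, List.cons_append,
        List.cons_prefix_iff, List.cons.injEq]
      aesop

-- ===== VERDICT (by name: the statement is the Claim_ definition above) =====
theorem model_rule_match_py_spec : Claim_equal_model_rule_match_py := by
  intro m r _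
  unfold Spec_model_rule_match_py model_rule_match_py model_rule_match_py_alt
  split_ifs with h1 h2
  · rfl
  · -- model_token == rule_token: the walk consumes both lists and accepts
    exact ((pvBWalk_iff r.toList m.toList).2 (Or.inl (by simpa [← String.toList_inj] using h2))).symm
  · rw [Bool.eq_iff_iff, pvBWalk_iff]
    simp only [List.any_eq_true, List.mem_cons, List.not_mem_nil, or_false,
      PySem.Str.startswith_eq, PySem.Chars.startswith_iff, String.toList_append]
    have hne : m.toList ≠ r.toList := by simpa [← String.toList_inj] using h2
    constructor
    · rintro ⟨x, (hx | hx | hx), hp⟩ <;> subst hx <;>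
        [exact Or.inr ⟨'-', by tauto, hp⟩; exact Or.inr ⟨'_', by tauto, hp⟩;
         exact Or.inr ⟨'.', by tauto, hp⟩]
    · rintro (h | ⟨c, hc, hp⟩)
      · exact absurd h hne
      · rcases hc with h | h | h <;> subst h <;>
          [exact ⟨"-", by tauto, hp⟩; exact ⟨"_", by tauto, hp⟩; exact ⟨".", by tauto, hp⟩]
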